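-- pv_equiv track=rewrite | github.com/EveRYouNg-OranGe/ICT | roi_zoom_gui_batch_v3.py | near_corner
-- ===== SOURCE A (Python) =====
-- def near_corner(px, py, rect, tol=12):
--     x, y, w, h = rect
--     corners = [
--         (x, y, "tl"),
--         (x + w, y, "tr"),
--         (x, y + h, "bl"),
--         (x + w, y + h, "br"),
--     ]
--     best = None
--     best_d = 10**9
--     for cx, cy, tag in corners:
--         d = (px - cx) ** 2 + (py - cy) ** 2
--         if d < best_d:
--             best_d = d
--             best = tag
--     if best_d <= tol * tol:
--         return best
--     return None
-- ===== SOURCE B (Python) =====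
-- def near_corner(px, py, rect, tol=12):
--     x, y, w, h = rect
--     right = (px - (x + w)) ** 2 < (px - x) ** 2
--     bottom = (py - (y + h)) ** 2 < (py - y) ** 2
--     cx = x + w if right else x
--     cy = y + h if bottom else y
--     d = (px - cx) ** 2 + (py - cy) ** 2
--     if d > tol * tol:
--         return None
--     return ("b" if bottom else "t") + ("r" if right else "l")
-- ===== Notes on version B (the rewrite author's own statement) =====
-- stated objective: simpler
-- what changed: B replaces A's loop over a list of four corners with a closed-form pick of the nearest corner per axis (separability of squared distance), computing one distance instead of four.
-- intended difference: When every corner is at squared distance >= 10**9 but the nearest is still within tol*tol, A's sentinel best_d=10**9 makes it return None although a corner is within tolerance, while B returns that corner's tag, which is the intended behaviour. — e.g. on near_corner(100000, 0, (0, 0, 0, 0), 100000): A returns none, B returns some "tl"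
import Mathlib
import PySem

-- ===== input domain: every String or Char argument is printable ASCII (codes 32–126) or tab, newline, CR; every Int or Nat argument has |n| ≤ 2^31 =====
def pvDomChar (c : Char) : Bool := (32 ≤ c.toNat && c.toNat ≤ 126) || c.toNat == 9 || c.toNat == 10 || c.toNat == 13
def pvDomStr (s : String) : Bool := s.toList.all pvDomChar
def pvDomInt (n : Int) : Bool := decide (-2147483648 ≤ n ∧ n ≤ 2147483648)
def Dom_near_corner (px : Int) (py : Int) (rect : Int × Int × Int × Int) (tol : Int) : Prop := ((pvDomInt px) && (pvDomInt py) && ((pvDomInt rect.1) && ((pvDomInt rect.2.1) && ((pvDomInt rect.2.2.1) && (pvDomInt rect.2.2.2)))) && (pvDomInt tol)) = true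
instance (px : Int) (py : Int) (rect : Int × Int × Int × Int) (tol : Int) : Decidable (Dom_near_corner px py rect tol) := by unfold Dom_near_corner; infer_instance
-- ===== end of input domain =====

-- B replaces A's four-corner loop with a per-axis closed-form choice of the nearest corner (objective: simpler).

-- ===== PORT A =====
def near_corner (px : Int) (py : Int) (rect : Int × Int × Int × Int) (tol : Int) : Option String :=
  let (x, y, w, h) := rect
  let corners : List (Int × Int × String) :=
    [(x, y, "tl"), (x + w, y, "tr"), (x, y + h, "bl"), (x + w, y + h, "br")]
  let st := corners.foldl (fun (st : Option String × Int) c =>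
      let (cx, cy, tag) := c
      let d := (px - cx) ^ 2 + (py - cy) ^ 2
      if d < st.2 then (some tag, d) else st)
    (none, 10 ^ 9)
  if st.2 ≤ tol * tol then st.1 else none

-- ===== PORT B =====
def near_corner_alt (px : Int) (py : Int) (rect : Int × Int × Int × Int) (tol : Int) : Option String :=
  let (x, y, w, h) := rect
  let right := (px - (x + w)) ^ 2 < (px - x) ^ 2
  let bottom := (py - (y + h)) ^ 2 < (py - y) ^ 2
  let cx := if right then x + w else x
  let cy := if bottom then y + h else y
  let d := (px - cx) ^ 2 + (py - cy) ^ 2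
  if d > tol * tol then none
  else some ((if bottom then "b" else "t") ++ (if right then "r" else "l"))

-- ===== PRECONDITION & SPEC =====
-- When every corner is at squared distance ≥ 10^9 but the nearest is still within tol*tol, A's
-- sentinel best_d = 10^9 makes it return none although a corner is within tolerance, while B
-- returns that corner's tag, which is the intended behaviour.
def D_near_corner (px : Int) (py : Int) (rect : Int × Int × Int × Int) (tol : Int) : Prop :=
  let m := min ((px - rect.1) ^ 2) ((px - (rect.1 + rect.2.2.1)) ^ 2)
         + min ((py - rect.2.1) ^ 2) ((py - (rect.2.1 + rect.2.2.2)) ^ 2)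
  1000000000 ≤ m ∧ m ≤ tol * tol
instance (px : Int) (py : Int) (rect : Int × Int × Int × Int) (tol : Int) : Decidable (D_near_corner px py rect tol) := by unfold D_near_corner; infer_instance

def Spec_near_corner (px : Int) (py : Int) (rect : Int × Int × Int × Int) (tol : Int) (out : Option String) : Prop := ¬ D_near_corner px py rect tol → out = near_corner_alt px py rect tol
instance (px : Int) (py : Int) (rect : Int × Int × Int × Int) (tol : Int) (out : Option String) : Decidable (Spec_near_corner px py rect tol out) := by unfold Spec_near_corner; infer_instance

def pvDiffWitness_near_corner : Int × Int × (Int × Int × Int × Int) × Int := (100000, 0, (0, 0, 0, 0), 100000)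
def pvDiffWitnessOut_near_corner : (Option String) × (Option String) := (none, some "tl")

-- ===== CLAIM (what is proved, stated in full; the proofs are below) =====
def Claim_unchanged_near_corner : Prop := ∀ (px : Int) (py : Int) (rect : Int × Int × Int × Int) (tol : Int), Dom_near_corner px py rect tol → Spec_near_corner px py rect tol (near_corner px py rect tol)
def Claim_changed_near_corner : Prop := Dom_near_corner (pvDiffWitness_near_corner.1) (pvDiffWitness_near_corner.2.1) (pvDiffWitness_near_corner.2.2.1) (pvDiffWitness_near_corner.2.2.2) ∧ D_near_corner (pvDiffWitness_near_corner.1) (pvDiffWitness_near_corner.2.1) (pvDiffWitness_near_corner.2.2.1) (pvDiffWitness_near_corner.2.2.2) ∧ near_corner (pvDiffWitness_near_corner.1) (pvDiffWitness_near_corner.2.1) (pvDiffWitness_near_corner.2.2.1) (pvDiffWitness_near_corner.2.2.2) = pvDiffWitnessOut_near_corner.1 ∧ near_corner_alt (pvDiffWitness_near_corner.1) (pvDiffWitness_near_corner.2.1) (pvDiffWitness_near_corner.2.2.1) (pvDiffWitness_near_corner.2.2.2) = pvDiffWitnessOut_near_corner.2 ∧ pvDiffWitnessOut_near_corner.1 ≠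 pvDiffWitnessOut_near_corner.2
def Claim_exact_near_corner : Prop := ∀ (px : Int) (py : Int) (rect : Int × Int × Int × Int) (tol : Int), Dom_near_corner px py rect tol → D_near_corner px py rect tol → near_corner px py rect tol ≠ near_corner_alt px py rect tol

-- ===== LEMMAS AND PROOFS =====

-- ===== VERDICT (by name: the statement is the Claim_ definition above) =====
theorem near_corner_spec : Claim_unchanged_near_corner := by
  rintro px py ⟨x, y, w, h⟩ tol _
  intro hD
  simp only [D_near_corner, not_and, not_le] at hD
  simp only [near_corner, near_corner_alt, List.foldl_cons, List.foldl_nil]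
  simp only [apply_ite (fun z : Int => (px - z) ^ 2), apply_ite (fun z : Int => (py - z) ^ 2)]
  rw [show (10 : Int) ^ 9 = 1000000000 from by norm_num]
  generalize (px - x) ^ 2 = a at *
  generalize (px - (x + w)) ^ 2 = b at *
  generalize (py - y) ^ 2 = c at *
  generalize (py - (y + h)) ^ 2 = d at *
  generalize tol * tol = t at *
  split_ifs at * <;> first | rfl | decide | (dsimp only at *; omega)

theorem near_corner_changed : Claim_changed_near_corner := by
  unfold Claim_changed_near_corner; decide

theorem near_corner_tight : Claim_exact_near_corner := by
  rintro px py ⟨x, y, w, h⟩ tol _ hD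
  simp only [D_near_corner] at hD
  simp only [near_corner, near_corner_alt, List.foldl_cons, List.foldl_nil]
  simp only [apply_ite (fun z : Int => (px - z) ^ 2), apply_ite (fun z : Int => (py - z) ^ 2)]
  rw [show (10 : Int) ^ 9 = 1000000000 from by norm_num]
  generalize (px - x) ^ 2 = a at *
  generalize (px - (x + w)) ^ 2 = b at *
  generalize (py - y) ^ 2 = c at *
  generalize (py - (y + h)) ^ 2 = d at *
  generalize tol * tol = t at *
  split_ifs at * <;> first | (simp; done) | (dsimp only at *; omega)
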